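-- pv_equiv track=rewrite | github.com/artemudovyk-konstankino/iam-access-resources-filter | src/main.py | find_allowed_resources_subset
-- ===== SOURCE A (Python) =====
-- def find_allowed_resources_subset(resources: list[str], allowed_resources: set[str]) -> set[str]:
--     allowed_resources_subset = []
--     wildcard_allowed_resources = [allowed_resource for allowed_resource in allowed_resources if "*" in allowed_resource]
--
--     for resource in resources:
--         if resource in allowed_resources:
--             allowed_resources_subset.append(resource)
--
--         # Check if the resource matches the wildcard allowed resource
--         for wildcard_allowed_resource in wildcard_allowed_resources:
--             if resource.startswith(wildcard_allowed_resource.replace("*", "")):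
--                 allowed_resources_subset.append(resource)
--
--     return set(allowed_resources_subset)
-- ===== SOURCE B (Python) =====
-- def _insert(node, s, i):
--     c = s[i]
--     if node is None:
--         node = [c, False, None, None, None]
--     if c < node[0]:
--         node[2] = _insert(node[2], s, i)
--     elif c > node[0]:
--         node[4] = _insert(node[4], s, i)
--     else:
--         if i + 1 == len(s):
--             node[1] = True
--         else:
--             node[3] = _insert(node[3], s, i + 1)
--     return node
--
--
-- def _match(node, s, i):
--     # True iff some prefix stored in the trie is a prefix of s
--     while node is not None and i < len(s):
--         c = s[i]
--         if c < node[0]: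
--             node = node[2]
--         elif c > node[0]:
--             node = node[4]
--         else:
--             if node[1]:
--                 return True
--             node = node[3]
--             i += 1
--     return False
--
--
-- def find_allowed_resources_subset(resources: list[str], allowed_resources: set[str]) -> set[str]:
--     # Build a ternary search trie of the stripped wildcard prefixes once;
--     # each resource is then decided by a single trie walk, not a scan over all wildcards.
--     root = None
--     empty_prefix = False
--     for w in allowed_resources:
--         if "*" in w:
--             p = w.replace("*", "")
--             if p:
--                 root = _insert(root, p, 0)
--             else:
--                 empty_prefix = True
--     return {r for r in resources
--             if r in allowed_resources or empty_prefix or _match(root, r, 0)}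
-- ===== Notes on version B (the rewrite author's own statement) =====
-- stated objective: alternative
-- what changed: Replaces A's per-resource scan over every wildcard (stripping each wildcard again for each resource) with a ternary search trie of the stripped prefixes built once, so each resource is decided by a single trie walk instead of a scan over the wildcard list.
import Mathlib
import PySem

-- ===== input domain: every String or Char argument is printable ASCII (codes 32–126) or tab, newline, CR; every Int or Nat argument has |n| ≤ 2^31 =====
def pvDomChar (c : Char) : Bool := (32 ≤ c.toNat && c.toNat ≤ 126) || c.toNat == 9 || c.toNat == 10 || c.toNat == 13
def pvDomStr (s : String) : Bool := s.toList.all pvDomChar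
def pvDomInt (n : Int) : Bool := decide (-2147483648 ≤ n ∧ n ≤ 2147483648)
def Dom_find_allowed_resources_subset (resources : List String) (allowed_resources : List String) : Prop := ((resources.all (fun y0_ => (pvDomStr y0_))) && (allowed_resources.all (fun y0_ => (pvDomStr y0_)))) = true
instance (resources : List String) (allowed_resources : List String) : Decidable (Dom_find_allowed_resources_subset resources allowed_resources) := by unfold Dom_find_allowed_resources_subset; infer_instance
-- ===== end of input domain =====

-- B replaces A's per-resource scan over all wildcards with a ternary search trie of the
-- stripped prefixes built once, so each resource is checked by one trie walk (alternative).


-- ===== PORT A =====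
def find_allowed_resources_subset (resources : List String) (allowed_resources : List String) : List String :=
  let wildcard_allowed_resources :=
    allowed_resources.filter (fun a => PySem.Str.isIn "*" a)
  let allowed_resources_subset :=
    resources.foldl (fun acc resource =>
      let acc := if PySem.Set.contains allowed_resources resource then acc ++ [resource] else acc
      wildcard_allowed_resources.foldl (fun acc2 w =>
        if PySem.Str.startswith resource (PySem.Str.replace w "*" "") then acc2 ++ [resource] else acc2) acc) []
  PySem.Set.ofList allowed_resources_subset

-- ===== PORT B =====
-- ternary search trie node (Python B's [char, terminal, lo, eq, hi] lists; None = .nil)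
inductive PVTrie : Type
  | nil : PVTrie
  | node : Char → Bool → PVTrie → PVTrie → PVTrie → PVTrie
deriving DecidableEq, Repr

-- _insert(node, s, i): the remaining characters s[i:] are passed as c :: cs
def pvInsert : PVTrie → Char → List Char → PVTrie
  | .nil, c, [] => .node c true .nil .nil .nil
  | .nil, c, d :: ds => .node c false .nil (pvInsert .nil d ds) .nil
  | .node c' t lo eq hi, c, cs =>
    if c < c' then .node c' t (pvInsert lo c cs) eq hi
    else if c' < c then .node c' t lo eq (pvInsert hi c cs)
    else match cs with
      | [] => .node c' true lo eq hi
      | d :: ds => .node c' t lo (pvInsert eq d ds) hi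
termination_by t c cs => (sizeOf t, cs.length)

-- _match(node, s, i): the while loop as tail recursion on the trie / remaining chars
def pvMatch : PVTrie → List Char → Bool
  | .nil, _ => false
  | .node _ _ _ _ _, [] => false
  | .node c' t lo eq hi, c :: cs =>
    if c < c' then pvMatch lo (c :: cs)
    else if c' < c then pvMatch hi (c :: cs)
    else if t then true else pvMatch eq cs

def find_allowed_resources_subset_alt (resources : List String) (allowed_resources : List String) : List String :=
  let st := allowed_resources.foldl (fun (st : PVTrie × Bool) w =>
    if PySem.Str.isIn "*" w then
      let p := PySem.Str.replace w "*" ""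
      match p.toList with
      | [] => (st.1, true)
      | c :: cs => (pvInsert st.1 c cs, st.2)
    else st) (.nil, false)
  PySem.Set.ofList (resources.filter (fun r =>
    PySem.Set.contains allowed_resources r || st.2 || pvMatch st.1 r.toList))

-- ===== PRECONDITION & SPEC =====
def Spec_find_allowed_resources_subset (resources : List String) (allowed_resources : List String) (out : List String) : Prop := out = find_allowed_resources_subset_alt resources allowed_resources
instance (resources : List String) (allowed_resources : List String) (out : List String) : Decidable (Spec_find_allowed_resources_subset resources allowed_resources out) := by unfold Spec_find_allowed_resources_subset; infer_instance

-- ===== CLAIM =====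
def Claim_equal_find_allowed_resources_subset : Prop := ∀ (resources : List String) (allowed_resources : List String), Dom_find_allowed_resources_subset resources allowed_resources → Spec_find_allowed_resources_subset resources allowed_resources (find_allowed_resources_subset resources allowed_resources)

-- ===== LEMMAS AND PROOFS =====

-- A's inner wildcard loop, after set(): it adds `r` once iff some wildcard prefix matches.
theorem pv_inner (r : String) (q : String → Bool) :
    ∀ (ws : List String) (acc : List String),
      PySem.Set.ofList (ws.foldl (fun a w => if q w then a ++ [r] else a) acc) =
        if ws.any q then PySem.Set.add (PySem.Set.ofList acc) r else PySem.Set.ofList acc := by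
  intro ws
  induction ws with
  | nil => intro acc; simp [List.foldl]
  | cons w ws ih =>
    intro acc
    simp only [List.foldl, List.any_cons]
    by_cases hw : q w = true
    · simp only [hw, if_true, Bool.true_or]
      rw [ih (acc ++ [r]), PySem.Set.ofList_append_singleton]
      split_ifs with h
      · exact PySem.Set.add_of_mem (by simp [PySem.Set.mem_add])
      · rfl
    · simp only [hw, if_false, Bool.false_or, Bool.false_eq_true]
      exact ih acc

-- A's whole outer loop, after set(): ofList of the B-style filtered resources.
theorem pv_outer (allowed : List String) :
    ∀ (rs : List String) (acc : List String),
      PySem.Set.ofList (rs.foldl (fun acc resource =>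
        (allowed.filter (fun a => PySem.Str.isIn "*" a)).foldl (fun acc2 w =>
            if PySem.Str.startswith resource (PySem.Str.replace w "*" "") then acc2 ++ [resource] else acc2)
          (if PySem.Set.contains allowed resource then acc ++ [resource] else acc)) acc) =
      PySem.Set.update (PySem.Set.ofList acc)
        (rs.filter (fun r => PySem.Set.contains allowed r ||
          (allowed.filter (fun a => PySem.Str.isIn "*" a)).any
            (fun w => PySem.Str.startswith r (PySem.Str.replace w "*" "")))) := by
  intro rs
  induction rs with
  | nil => intro acc; rfl
  | cons r rs ih =>
    intro acc
    simp only [List.foldl, List.filter_cons]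
    rw [ih, pv_inner r (fun w => PySem.Str.startswith r (PySem.Str.replace w "*" ""))]
    by_cases hc : PySem.Set.contains allowed r = true
    · simp only [hc, if_true, Bool.true_or]
      rw [PySem.Set.ofList_append_singleton, PySem.Set.update_cons]
      split_ifs with h
      · rw [PySem.Set.add_of_mem (by simp [PySem.Set.mem_add])]
      · rfl
    · simp only [hc, if_false, Bool.false_or, Bool.false_eq_true]
      by_cases hany : ((allowed.filter (fun a => PySem.Str.isIn "*" a)).any
          (fun w => PySem.Str.startswith r (PySem.Str.replace w "*" ""))) = true
      · simp only [hany, if_true]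
        rw [PySem.Set.update_cons]
      · simp only [hany, if_false, Bool.false_eq_true]

-- Bool bridge: List.isPrefixOf is decide of the prefix relation
theorem pv_isPrefixOf_eq (a b : List Char) : a.isPrefixOf b = decide (a <+: b) := by
  by_cases h : a <+: b
  · simp [List.isPrefixOf_iff_prefix.mpr h, h]
  · rw [decide_eq_false h, Bool.eq_false_iff]
    intro hc
    exact h (List.isPrefixOf_iff_prefix.mp hc)

-- a freshly built chain matches s iff c :: cs is a prefix of s
theorem pv_match_fresh (cs : List Char) :
    ∀ (c : Char) (s : List Char), pvMatch (pvInsert .nil c cs) s = decide ((c :: cs) <+: s) := by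
  induction cs with
  | nil =>
    intro c s
    cases s with
    | nil => simp [pvInsert, pvMatch]
    | cons a as =>
      simp only [pvInsert, pvMatch, List.cons_prefix_cons]
      rcases lt_trichotomy a c with h | h | h
      · simp [h, h.ne']
      · simp [h, lt_irrefl]
      · simp [h, h.ne, not_lt.mpr h.le]
  | cons d ds ih =>
    intro c s
    cases s with
    | nil => simp [pvInsert, pvMatch]
    | cons a as =>
      simp only [pvInsert, pvMatch, List.cons_prefix_cons]
      rcases lt_trichotomy a c with h | h | h
      · simp [h, h.ne']
      · simp [h, lt_irrefl, ih d as, List.cons_prefix_cons]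
      · simp [h, h.ne, not_lt.mpr h.le]

theorem pv_match_insert (t : PVTrie) :
    ∀ (c : Char) (cs : List Char) (s : List Char),
      pvMatch (pvInsert t c cs) s = (decide ((c :: cs) <+: s) || pvMatch t s) := by
  induction t with
  | nil => intro c cs s; simp [pvMatch, pv_match_fresh]
  | node c' t' lo eq hi ihlo iheq ihhi =>
    intro c cs s
    rcases lt_trichotomy c c' with hc | hc | hc
    · rw [pvInsert.eq_def]; simp only [hc, if_true]
      cases s with
      | nil => simp [pvMatch]
      | cons a as =>
        simp only [pvMatch, List.cons_prefix_cons]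
        rcases lt_trichotomy a c' with h | h | h
        · simp [h, ihlo]
        · subst h; simp [lt_irrefl, (hc.ne : c ≠ a)]
        · have : ¬ (c = a) := (hc.trans h).ne
          simp [h, not_lt.mpr h.le, this]
    · subst hc
      cases cs with
      | nil =>
        rw [pvInsert.eq_def]; simp only [lt_irrefl, if_false]
        cases s with
        | nil => simp [pvMatch]
        | cons a as =>
          simp only [pvMatch, List.cons_prefix_cons]
          rcases lt_trichotomy a c with h | h | h
          · simp [h, h.ne']
          · subst h; simp [lt_irrefl]
          · simp [h, h.ne, not_lt.mpr h.le]
      | cons d ds =>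
        rw [pvInsert.eq_def]; simp only [lt_irrefl, if_false]
        cases s with
        | nil => simp [pvMatch]
        | cons a as =>
          simp only [pvMatch, List.cons_prefix_cons]
          rcases lt_trichotomy a c with h | h | h
          · simp [h, h.ne']
          · subst h
            by_cases ht : t' = true
            · simp [ht, lt_irrefl]
            · simp [ht, lt_irrefl, iheq d ds as, List.cons_prefix_cons]
          · simp [h, h.ne, not_lt.mpr h.le]
    · rw [pvInsert.eq_def]; simp only [hc, not_lt.mpr hc.le, if_false, if_true]
      cases s with
      | nil => simp [pvMatch]
      | cons a as =>
        simp only [pvMatch, List.cons_prefix_cons]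
        rcases lt_trichotomy a c' with h | h | h
        · have : ¬ (c = a) := fun e => absurd (e ▸ hc) (not_lt.mpr h.le) -- c' < c, a < c' → a < c so c ≠ a
          simp [h, this]
        · subst h; simp [lt_irrefl, (hc.ne' : c ≠ a)]
        · simp [h, not_lt.mpr h.le, ihhi]

-- the fold building (trie, emptyFlag) over the allowed list tests "some stripped wildcard prefix matches"
theorem pv_fold_trie (r : String) :
    ∀ (ws : List String) (st : PVTrie × Bool),
      (let st' := ws.foldl (fun (st : PVTrie × Bool) w =>
        if PySem.Str.isIn "*" w then
          let p := PySem.Str.replace w "*" ""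
          match p.toList with
          | [] => (st.1, true)
          | c :: cs => (pvInsert st.1 c cs, st.2)
        else st) st
       st'.2 || pvMatch st'.1 r.toList) =
      (st.2 || pvMatch st.1 r.toList ||
        (ws.filter (fun a => PySem.Str.isIn "*" a)).any
          (fun w => PySem.Str.startswith r (PySem.Str.replace w "*" ""))) := by
  intro ws
  induction ws with
  | nil => intro st; simp
  | cons w ws ih =>
    intro st
    simp only [List.foldl, List.filter_cons]
    by_cases hw : PySem.Str.isIn "*" w = true
    · simp only [hw, if_true, List.any_cons]
      have hsw : PySem.Str.startswith r (PySem.Str.replace w "*" "") =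
          decide ((PySem.Str.replace w "*" "").toList <+: r.toList) := by
        simp [PySem.Str.startswith_eq, PySem.Chars.startswith, pv_isPrefixOf_eq]
      rcases hp : (PySem.Str.replace w "*" "").toList with _ | ⟨c, cs⟩
      · simp only [hp]
        rw [ih (st.1, true)]
        simp only [hsw, hp, List.nil_prefix, decide_true, Bool.true_or, Bool.or_true]
      · simp only [hp]
        rw [ih (pvInsert st.1 c cs, st.2)]
        simp only [pv_match_insert st.1 c cs r.toList, hsw, hp]
        cases st.2 <;> cases (decide ((c :: cs) <+: r.toList)) <;>
          cases pvMatch st.1 r.toList <;> simp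
    · simp only [hw, if_false, Bool.false_eq_true]
      exact ih st

-- ===== VERDICT =====
theorem find_allowed_resources_subset_spec : Claim_equal_find_allowed_resources_subset := by
  intro resources allowed _
  show _ = _
  unfold find_allowed_resources_subset find_allowed_resources_subset_alt
  rw [pv_outer allowed resources []]
  show PySem.Set.update (PySem.Set.ofList []) _ = _
  rw [PySem.Set.ofList_eq_foldl, PySem.Set.ofList_eq_foldl]
  show List.foldl _ [] _ = List.foldl _ [] _
  congr 1
  apply List.filter_congr
  intro r _
  have := pv_fold_trie r allowed (PVTrie.nil, false)
  simp only [pvMatch, Bool.false_or, Bool.or_false] at this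
  rw [Bool.or_assoc, this]
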